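-- pv_equiv track=rewrite | github.com/bjarkemoensted/adventofcode | aoc/2023/solution22.py | count_chain_reaction_cubes
-- ===== SOURCE A (Python) =====
-- def count_chain_reaction_cubes(restmap):
--     """Counts the number of cubes which can be disintegrated as a result of a chain reaction.
--     Works by trying to start a chain reaction from each cube and observing the number of cubes destroyed in the
--     subsequent chain reaction."""
--
--     res = 0
--     for cube in restmap.keys():
--         # Repeatedly destroy cubes which just lost all their supports
--         destroyed = set([])
--         boom = {cube}
--         while boom:
--             destroyed = destroyed.union(boom)
--             boom = set([])
--             for newcube, supports in restmap.items():
--                 if supports and all(support in destroyed for support in supports) and newcube not in destroyed: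
--                     boom.add(newcube)
--                 #
--             #
--         # Only count the cubes destroyed from the chain reaction, not the initial destruction
--         res += len(destroyed) - 1
--
--     return res
-- ===== SOURCE B (Python) =====
-- def count_chain_reaction_cubes(restmap):
--     """Counts the number of cubes destroyed in the chain reaction started at each cube, summed.
--     Kahn-style worklist per start cube: a reverse index (support -> dependent cubes) and a
--     remaining-support counter per cube replace the repeated full scans of restmap."""
--     supports_of = {k: list(dict.fromkeys(sups)) for k, sups in restmap.items()}
--     dependents = {}
--     for k, sups in supports_of.items():
--         for s in sups:
--             dependents.setdefault(s, []).append(k)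
--     base = {k: len(sups) for k, sups in supports_of.items()}
--     res = 0
--     for start in supports_of.keys():
--         remaining = dict(base)
--         destroyed = {start}
--         stack = [start]
--         while stack:
--             cur = stack.pop()
--             for dep in dependents.get(cur, []):
--                 remaining[dep] -= 1
--                 if remaining[dep] == 0 and supports_of[dep] and dep not in destroyed:
--                     destroyed.add(dep)
--                     stack.append(dep)
--         res += len(destroyed) - 1
--     return res
-- ===== Notes on version B (the rewrite author's own statement) =====
-- stated objective: faster
-- what changed: Replaced the per-start round-based saturation (rescanning every cube of restmap in every round) by a per-start worklist propagation over a precomputed reverse index (support -> dependent cubes) with remaining-support counters, so each edge is touched once per start.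
import Mathlib
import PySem

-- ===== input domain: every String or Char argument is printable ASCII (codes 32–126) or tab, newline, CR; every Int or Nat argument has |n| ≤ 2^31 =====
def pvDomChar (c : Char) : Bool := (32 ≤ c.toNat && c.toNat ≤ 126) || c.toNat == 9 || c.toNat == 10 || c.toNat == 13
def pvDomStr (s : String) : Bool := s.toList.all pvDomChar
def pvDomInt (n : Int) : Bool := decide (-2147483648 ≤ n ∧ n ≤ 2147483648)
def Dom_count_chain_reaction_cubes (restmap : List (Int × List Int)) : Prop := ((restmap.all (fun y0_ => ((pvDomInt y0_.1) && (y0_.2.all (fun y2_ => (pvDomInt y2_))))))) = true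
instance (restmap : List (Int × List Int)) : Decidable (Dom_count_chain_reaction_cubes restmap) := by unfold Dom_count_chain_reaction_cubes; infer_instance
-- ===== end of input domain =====

-- B replaces A's per-start round-based rescans of restmap by a per-start worklist over a
-- precomputed reverse index (support -> dependents) with remaining-support counters (faster).

-- ===== PORT A =====
-- the inner `for newcube, supports in restmap.items(): if supports and all(...) and newcube not in destroyed: boom.add(newcube)`
def pvAStep (items : List (Int × List Int)) (destroyed : PySem.Set Int) : PySem.Set Int :=
  items.foldl (fun boom p =>
    if !p.2.isEmpty && p.2.all (fun s => PySem.Set.contains destroyed s)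
        && !PySem.Set.contains destroyed p.1
    then PySem.Set.add boom p.1 else boom) PySem.Set.empty

-- A's `while boom:` loop; the fuel only makes it total (it is proved sufficient below)
def pvALoop (items : List (Int × List Int)) : Nat → PySem.Set Int → PySem.Set Int → PySem.Set Int
  | 0, destroyed, _ => destroyed
  | fuel+1, destroyed, boom =>
    if boom.isEmpty then destroyed
    else
      let destroyed' := PySem.Set.union destroyed boom
      pvALoop items fuel destroyed' (pvAStep items destroyed')

def count_chain_reaction_cubes (restmap : List (Int × List Int)) : Int :=
  let d := PySem.Dict.ofList restmap
  d.keys.foldl (fun res cube =>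
    let destroyed := pvALoop d.items (d.items.length + 1) PySem.Set.empty (PySem.Set.ofList [cube])
    res + ((PySem.Set.len destroyed : Int) - 1)) 0

-- ===== PORT B =====
-- body of `for dep in dependents.get(cur, [])`: remaining[dep] -= 1 (dep is always a key, so
-- modify with default 0 is exact); push/destroy when the counter hits 0
def pvBInner (supd : PySem.Dict Int (List Int))
    (st : List Int × PySem.Set Int × PySem.Dict Int Int) (dp : Int) :
    List Int × PySem.Set Int × PySem.Dict Int Int :=
  let rem := st.2.2.modify dp 0 (fun v => v - 1)
  if rem.getD dp 0 == 0 && !(supd.getD dp []).isEmpty && !PySem.Set.contains st.2.1 dp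
  then (st.1 ++ [dp], PySem.Set.add st.2.1 dp, rem)
  else (st.1, st.2.1, rem)

-- B's `while stack:` loop; `stack.pop()` pops the LAST element (getLastD/dropLast); fuel only for totality
def pvBLoop (supd dep : PySem.Dict Int (List Int)) :
    Nat → List Int → PySem.Set Int → PySem.Dict Int Int → PySem.Set Int
  | 0, _, destroyed, _ => destroyed
  | fuel+1, stack, destroyed, remaining =>
    if stack.isEmpty then destroyed
    else
      let cur := stack.getLastD 0
      let rest := stack.dropLast
      let out := (dep.getD cur []).foldl (pvBInner supd) (rest, destroyed, remaining)
      pvBLoop supd dep fuel out.1 out.2.1 out.2.2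

def count_chain_reaction_cubes_alt (restmap : List (Int × List Int)) : Int :=
  let d := PySem.Dict.ofList restmap
  let supd := d.items.foldl (fun m p => m.insert p.1 (PySem.List.dedup p.2)) PySem.Dict.empty
  let dep := supd.items.foldl (fun dd p =>
      p.2.foldl (fun dd s => dd.modify s [] (fun l => l ++ [p.1])) dd) PySem.Dict.empty
  let base := supd.items.foldl (fun m p => m.insert p.1 ((p.2.length : Int))) PySem.Dict.empty
  supd.keys.foldl (fun res start =>
    let destroyed := pvBLoop supd dep (restmap.length + 1) [start] (PySem.Set.ofList [start]) base
    res + ((PySem.Set.len destroyed : Int) - 1)) 0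

-- ===== PRECONDITION & SPEC =====
def Spec_count_chain_reaction_cubes (restmap : List (Int × List Int)) (out : Int) : Prop := out = count_chain_reaction_cubes_alt restmap
instance (restmap : List (Int × List Int)) (out : Int) : Decidable (Spec_count_chain_reaction_cubes restmap out) := by unfold Spec_count_chain_reaction_cubes; infer_instance

-- ===== CLAIM (what is proved, stated in full; the proofs are below) =====
def Claim_equal_count_chain_reaction_cubes : Prop := ∀ (restmap : List (Int × List Int)), Dom_count_chain_reaction_cubes restmap → Spec_count_chain_reaction_cubes restmap (count_chain_reaction_cubes restmap)

-- ===== LEMMAS AND PROOFS =====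

-- `P` holds of a cube's key whenever it holds of all (≥1) supports: the chain-reaction closure rule
def pvClosedOn (items : List (Int × List Int)) (P : Int → Prop) : Prop :=
  ∀ p ∈ items, p.2 ≠ [] → (∀ s ∈ p.2, P s) → P p.1

-- `R` is THE chain-reaction set from `start`: contains start, closed, duplicate-free, minimal
def pvGood (items : List (Int × List Int)) (start : Int) (R : List Int) : Prop :=
  start ∈ R ∧ pvClosedOn items (· ∈ R) ∧ R.Nodup ∧
    ∀ P : Int → Prop, P start → pvClosedOn items P → ∀ x ∈ R, P x

lemma pvGood_length_eq {items : List (Int × List Int)} {start : Int} {R R' : List Int}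
    (h : pvGood items start R) (h' : pvGood items start R') : R.length = R'.length := by
  obtain ⟨hs, hc, hn, hm⟩ := h
  obtain ⟨hs', hc', hn', hm'⟩ := h'
  have e : ∀ x, x ∈ R ↔ x ∈ R' := fun x =>
    ⟨fun hx => hm (· ∈ R') hs' hc' x hx, fun hx => hm' (· ∈ R) hs hc x hx⟩
  exact ((List.perm_ext_iff_of_nodup hn hn').mpr e).length_eq

-- ---------- A side ----------

lemma mem_pvAStep {items : List (Int × List Int)} {D : PySem.Set Int} {x : Int} :
    x ∈ pvAStep items D ↔ ∃ sup, (x, sup) ∈ items ∧ sup ≠ [] ∧ (∀ s ∈ sup, s ∈ D) ∧ x ∉ D := by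
  have hcond : ∀ q : Int × List Int,
      ((!q.2.isEmpty && q.2.all (fun s => PySem.Set.contains D s)
        && !PySem.Set.contains D q.1) = true) ↔
      (q.2 ≠ [] ∧ (∀ s ∈ q.2, s ∈ D) ∧ q.1 ∉ D) := by
    intro q
    constructor
    · intro h
      simp only [Bool.and_eq_true, Bool.not_eq_true'] at h
      obtain ⟨⟨he, ha⟩, hc⟩ := h
      refine ⟨?_, ?_, ?_⟩
      · intro hnil; rw [hnil] at he; simp at he
      · intro s hs
        exact (PySem.Set.contains_iff D s).mp ((List.all_eq_true.mp ha) s hs)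
      · intro hmem
        rw [(PySem.Set.contains_iff D q.1).mpr hmem] at hc
        simp at hc
    · rintro ⟨h1, h2, h3⟩
      simp only [Bool.and_eq_true, Bool.not_eq_true', List.all_eq_true]
      refine ⟨⟨?_, fun s hs => (PySem.Set.contains_iff D s).mpr (h2 s hs)⟩, ?_⟩
      · cases hq : q.2 with
        | nil => exact absurd hq h1
        | cons a t => rfl
      · by_cases hcont : PySem.Set.contains D q.1 = true
        · exact absurd ((PySem.Set.contains_iff D q.1).mp hcont) h3
        · simpa using hcont
  have aux : ∀ (its : List (Int × List Int)) (acc : PySem.Set Int),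
      x ∈ its.foldl (fun boom p =>
        if !p.2.isEmpty && p.2.all (fun s => PySem.Set.contains D s)
            && !PySem.Set.contains D p.1
        then PySem.Set.add boom p.1 else boom) acc ↔
      x ∈ acc ∨ ∃ sup, (x, sup) ∈ its ∧ sup ≠ [] ∧ (∀ s ∈ sup, s ∈ D) ∧ x ∉ D := by
    intro its
    induction its with
    | nil => intro acc; simp
    | cons p t ih =>
      intro acc
      simp only [List.foldl_cons]
      by_cases hc : p.2 ≠ [] ∧ (∀ s ∈ p.2, s ∈ D) ∧ p.1 ∉ D
      · rw [if_pos ((hcond p).mpr hc), ih]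
        simp only [PySem.Set.mem_add, List.mem_cons]
        constructor
        · rintro ((hx | rfl) | ⟨sup, hsup, h1, h2, h3⟩)
          · exact Or.inl hx
          · exact Or.inr ⟨p.2, Or.inl rfl, hc.1, hc.2.1, hc.2.2⟩
          · exact Or.inr ⟨sup, Or.inr hsup, h1, h2, h3⟩
        · rintro (hx | ⟨sup, (hm | hsup), h1, h2, h3⟩)
          · exact Or.inl (Or.inl hx)
          · exact Or.inl (Or.inr (congrArg Prod.fst hm))
          · exact Or.inr ⟨sup, hsup, h1, h2, h3⟩
      · rw [if_neg (fun hb => hc ((hcond p).mp hb)), ih]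
        simp only [List.mem_cons]
        constructor
        · rintro (hx | ⟨sup, hsup, h1, h2, h3⟩)
          · exact Or.inl hx
          · exact Or.inr ⟨sup, Or.inr hsup, h1, h2, h3⟩
        · rintro (hx | ⟨sup, (hm | hsup), h1, h2, h3⟩)
          · exact Or.inl hx
          · exfalso
            apply hc
            have hx1 : x = p.1 := congrArg Prod.fst hm
            have hs2 : sup = p.2 := congrArg Prod.snd hm
            rw [hs2] at h1 h2
            rw [hx1] at h3
            exact ⟨h1, h2, h3⟩
          · exact Or.inr ⟨sup, hsup, h1, h2, h3⟩
  have hdef : pvAStep items D = items.foldl (fun boom p =>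
      if !p.2.isEmpty && p.2.all (fun s => PySem.Set.contains D s)
          && !PySem.Set.contains D p.1
      then PySem.Set.add boom p.1 else boom) PySem.Set.empty := rfl
  rw [hdef, aux]
  simp [PySem.Set.empty]

lemma nodup_pvAStep {items : List (Int × List Int)} {D : PySem.Set Int} :
    (pvAStep items D).Nodup := by
  have aux : ∀ (its : List (Int × List Int)) (acc : PySem.Set Int), acc.Nodup →
      (its.foldl (fun boom p =>
        if !p.2.isEmpty && p.2.all (fun s => PySem.Set.contains D s)
            && !PySem.Set.contains D p.1
        then PySem.Set.add boom p.1 else boom) acc).Nodup := by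
    intro its
    induction its with
    | nil => intro acc h; exact h
    | cons p t ih =>
      intro acc h
      simp only [List.foldl_cons]
      split
      · exact ih _ (PySem.Set.nodup_add _ _ h)
      · exact ih _ h
  exact aux items PySem.Set.empty (by simp [PySem.Set.empty])

lemma pvALoop_spec (items : List (Int × List Int)) (P : Int → Prop) (hP : pvClosedOn items P) :
    ∀ (fuel : Nat) (destroyed boom : PySem.Set Int),
      destroyed.Nodup → boom.Nodup → (∀ x ∈ boom, x ∉ destroyed) →
      (boom = [] → pvAStep items destroyed = []) →
      (∀ x, x ∈ destroyed ∨ x ∈ boom → x ∈ items.map Prod.fst) →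
      (items.map Prod.fst).Nodup →
      (∀ x ∈ destroyed, P x) → (∀ x ∈ boom, P x) →
      items.length + 1 ≤ fuel + destroyed.length →
      (∀ x, x ∈ destroyed ∨ x ∈ boom → x ∈ pvALoop items fuel destroyed boom) ∧
        (pvALoop items fuel destroyed boom).Nodup ∧
        pvClosedOn items (· ∈ pvALoop items fuel destroyed boom) ∧
        (∀ x ∈ pvALoop items fuel destroyed boom, P x) := by
  intro fuel
  induction fuel with
  | zero =>
    intro destroyed boom hd _ _ _ hkeys _ _ _ hlen
    exfalso
    have hsub : destroyed ⊆ items.map Prod.fst := fun x hx => hkeys x (Or.inl hx)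
    have := (List.Nodup.subperm hd hsub).length_le
    simp only [List.length_map] at this
    omega
  | succ fuel ih =>
    intro destroyed boom hd hb hdisj hstep hkeys hknd hPd hPb hlen
    by_cases hbe : boom = []
    · have hred : pvALoop items (fuel + 1) destroyed boom = destroyed := by
        simp [pvALoop, hbe]
      rw [hred]
      refine ⟨?_, hd, ?_, hPd⟩
      · intro x hx
        rcases hx with hx | hx
        · exact hx
        · rw [hbe] at hx; simp at hx
      · intro p hp hne hsub
        by_cases hpd : p.1 ∈ destroyed
        · exact hpd
        · exfalso
          have : p.1 ∈ pvAStep items destroyed :=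
            mem_pvAStep.mpr ⟨p.2, by simpa using hp, hne, hsub, hpd⟩
          rw [hstep hbe] at this
          simp at this
    · have hred : pvALoop items (fuel + 1) destroyed boom =
          pvALoop items fuel (PySem.Set.union destroyed boom)
            (pvAStep items (PySem.Set.union destroyed boom)) := by
        rw [pvALoop]
        rw [if_neg (by simp [List.isEmpty_iff, hbe])]
      rw [hred]
      have hun : PySem.Set.union destroyed boom = destroyed ++ boom := by
        show PySem.Set.update destroyed boom = destroyed ++ boom
        exact PySem.Set.update_eq_append_of_disjoint destroyed boom hb hdisj
      have hd' : (PySem.Set.union destroyed boom).Nodup := by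
        rw [hun]
        exact List.Nodup.append hd hb (by
          simp only [List.disjoint_left]
          intro a ha hab
          exact hdisj a hab ha)
      have hmemun : ∀ x, x ∈ PySem.Set.union destroyed boom ↔ x ∈ destroyed ∨ x ∈ boom := by
        intro x; rw [hun]; simp
      have hlenun : (PySem.Set.union destroyed boom).length =
          destroyed.length + boom.length := by rw [hun]; simp
      have hPd' : ∀ x ∈ PySem.Set.union destroyed boom, P x := by
        intro x hx
        rcases (hmemun x).mp hx with h | h
        · exact hPd x h
        · exact hPb x h
      have hout := ih (PySem.Set.union destroyed boom)
        (pvAStep items (PySem.Set.union destroyed boom))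
        hd' nodup_pvAStep
        (by
          intro x hx
          obtain ⟨_, _, _, _, hnd⟩ := mem_pvAStep.mp hx
          exact hnd)
        (fun h => h)
        (by
          intro x hx
          rcases hx with hx | hx
          · exact hkeys x (Or.imp id id ((hmemun x).mp hx))
          · obtain ⟨sup, hm, _, _, _⟩ := mem_pvAStep.mp hx
            exact List.mem_map.mpr ⟨(x, sup), hm, rfl⟩)
        hknd hPd'
        (by
          intro x hx
          obtain ⟨sup, hm, hne, hsub, _⟩ := mem_pvAStep.mp hx
          exact hP (x, sup) hm hne (fun s hs => hPd' s (hsub s hs)))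
        (by
          have : 1 ≤ boom.length := List.length_pos_of_ne_nil hbe
          omega)
      refine ⟨?_, hout.2.1, hout.2.2.1, hout.2.2.2⟩
      intro x hx
      exact hout.1 x (Or.inl ((hmemun x).mpr hx))

lemma pvA_good (items : List (Int × List Int)) (start : Int)
    (hk : (items.map Prod.fst).Nodup) (hs : start ∈ items.map Prod.fst) :
    pvGood items start (pvALoop items (items.length + 1) [] [start]) := by
  have base : ∀ (P : Int → Prop), pvClosedOn items P → P start →
      (∀ x, x ∈ ([] : List Int) ∨ x ∈ [start] → x ∈ pvALoop items (items.length + 1) [] [start]) ∧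
        (pvALoop items (items.length + 1) [] [start]).Nodup ∧
        pvClosedOn items (· ∈ pvALoop items (items.length + 1) [] [start]) ∧
        (∀ x ∈ pvALoop items (items.length + 1) [] [start], P x) := by
    intro P hPc hPs
    exact pvALoop_spec items P hPc (items.length + 1) [] [start]
      (by simp) (by simp) (by simp) (by simp)
      (by
        intro x hx
        rcases hx with hx | hx
        · simp at hx
        · simp only [List.mem_singleton] at hx
          subst hx
          exact hs)
      hk (by simp)
      (by
        intro x hx
        simp only [List.mem_singleton] at hx
        subst hx
        exact hPs)
      (by simp)
  have triv := base (fun _ => True) (by intro _ _ _ _; trivial) trivial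
  refine ⟨triv.1 start (Or.inr (by simp)), triv.2.2.1, triv.2.1, ?_⟩
  intro P hPs hPc
  exact (base P hPc hPs).2.2.2

-- ---------- small list helpers ----------

lemma pv_filter_beq_of_nodup (l : List Int) (hl : l.Nodup) (c : Int) :
    l.filter (fun s => s == c) = if c ∈ l then [c] else [] := by
  induction l with
  | nil => simp
  | cons a t ih =>
    simp only [List.nodup_cons] at hl
    by_cases hac : a = c
    · subst hac
      simp [hl.1, ih hl.2]
    · have : (a == c) = false := by simp [hac]
      simp [this, ih hl.2, Ne.symm hac]

lemma pv_filter_length_step (l : List Int) (hl : l.Nodup) (p q : Int → Bool) (a : Int)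
    (hpa : p a = true) (hq : ∀ x, q x = (p x && !(x == a))) :
    ((l.filter q).length : Int) = ((l.filter p).length : Int) - (if a ∈ l then 1 else 0) := by
  induction l with
  | nil => simp
  | cons b t ih =>
    simp only [List.nodup_cons] at hl
    have iht := ih hl.2
    by_cases hba : b = a
    · subst hba
      have hqb : q b = false := by rw [hq]; simp
      have hbt : (if b ∈ t then (1 : Int) else 0) = 0 := by simp [hl.1]
      rw [hbt] at iht
      simp only [List.filter_cons, hqb, hpa, if_true, Bool.false_eq_true, if_false]
      simp only [List.mem_cons, true_or, if_true, List.length_cons]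
      push_cast
      omega
    · have hqb : q b = p b := by rw [hq]; simp [hba]
      have hmem : (if a ∈ b :: t then (1 : Int) else 0) = (if a ∈ t then (1 : Int) else 0) := by
        simp [List.mem_cons, Ne.symm hba]
      rw [hmem]
      by_cases hpb : p b = true
      · simp only [List.filter_cons, hqb, hpb, if_true, List.length_cons]
        push_cast
        push_cast at iht
        omega
      · simp only [List.filter_cons, hqb, hpb, Bool.false_eq_true, if_false]
        exact iht

lemma pv_filter_singleton_of_length_one (l : List Int) (q : Int → Bool) (a : Int)
    (ha : a ∈ l) (hqa : q a = true) (hlen : (l.filter q).length = 1) :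
    ∀ x ∈ l, q x = true → x = a := by
  obtain ⟨b, hb⟩ := List.length_eq_one_iff.mp hlen
  have hab : a = b := by
    have : a ∈ l.filter q := List.mem_filter.mpr ⟨ha, hqa⟩
    rw [hb] at this; simpa using this
  intro x hx hqx
  have : x ∈ l.filter q := List.mem_filter.mpr ⟨hx, hqx⟩
  rw [hb] at this
  simp only [List.mem_singleton] at this
  rw [this, hab]

lemma pv_size_ofList_le (l : List (Int × List Int)) :
    (PySem.Dict.ofList l).items.length ≤ l.length := by
  have aux : ∀ (t : List (Int × List Int)) (d : PySem.Dict Int (List Int)),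
      (t.foldl (fun d p => d.insert p.1 p.2) d).items.length ≤ d.items.length + t.length := by
    intro t
    induction t with
    | nil => intro d; simp
    | cons p r ih =>
      intro d
      simp only [List.foldl_cons, List.length_cons]
      have h1 := ih (d.insert p.1 p.2)
      have h2 : (d.insert p.1 p.2).items.length ≤ d.items.length + 1 := by
        have := PySem.Dict.size_insert d p.1 p.2
        simp only [PySem.Dict.size] at this
        rw [this]
        split <;> omega
      omega
  have := aux l PySem.Dict.empty
  simpa [PySem.Dict.ofList, PySem.Dict.empty] using this

-- ---------- B side ----------

lemma pvBFold_spec (supd : PySem.Dict Int (List Int)) :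
    ∀ (deps : List Int), deps.Nodup →
    ∀ (stack0 destroyed0 : List Int) (remaining : PySem.Dict Int Int),
      (deps.foldl (pvBInner supd) (stack0, destroyed0, remaining)).1 =
          stack0 ++ deps.filter (fun x => (remaining.getD x 0 - 1 == 0)
            && !(supd.getD x []).isEmpty && !destroyed0.contains x) ∧
      (deps.foldl (pvBInner supd) (stack0, destroyed0, remaining)).2.1 =
          destroyed0 ++ deps.filter (fun x => (remaining.getD x 0 - 1 == 0)
            && !(supd.getD x []).isEmpty && !destroyed0.contains x) ∧
      ∀ k, (deps.foldl (pvBInner supd) (stack0, destroyed0, remaining)).2.2.getD k 0 =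
          remaining.getD k 0 - (if k ∈ deps then 1 else 0) := by
  intro deps
  induction deps with
  | nil =>
    intro _ stack0 destroyed0 remaining
    refine ⟨by simp, by simp, ?_⟩
    intro k; simp
  | cons dp t ih =>
    intro hnd stack0 destroyed0 remaining
    simp only [List.nodup_cons] at hnd
    obtain ⟨hdpt, hndt⟩ := hnd
    simp only [List.foldl_cons]
    have hrem_dp : (remaining.modify dp 0 (fun v => v - 1)).getD dp 0 =
        remaining.getD dp 0 - 1 := PySem.Dict.getD_modify_self remaining dp 0 _
    have hrem_ne : ∀ k, k ≠ dp → (remaining.modify dp 0 (fun v => v - 1)).getD k 0 =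
        remaining.getD k 0 := by
      intro k hk
      rw [PySem.Dict.getD_modify, if_neg hk]
    have hinner : pvBInner supd (stack0, destroyed0, remaining) dp =
        if (remaining.getD dp 0 - 1 == 0) && !(supd.getD dp []).isEmpty
            && !destroyed0.contains dp
        then (stack0 ++ [dp], PySem.Set.add destroyed0 dp,
              remaining.modify dp 0 (fun v => v - 1))
        else (stack0, destroyed0, remaining.modify dp 0 (fun v => v - 1)) := by
      show (if (remaining.modify dp 0 (fun v => v - 1)).getD dp 0 == 0
            && !(supd.getD dp []).isEmpty && !PySem.Set.contains destroyed0 dp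
          then _ else _) = _
      rw [hrem_dp]
      rfl
    by_cases hc : ((remaining.getD dp 0 - 1 == 0) && !(supd.getD dp []).isEmpty
        && !destroyed0.contains dp) = true
    · have hdpnd : dp ∉ destroyed0 := by
        simp only [Bool.and_eq_true, Bool.not_eq_true'] at hc
        intro hmem
        rw [List.contains_iff_mem.mpr hmem] at hc
        simp at hc
      have hadd : PySem.Set.add destroyed0 dp = destroyed0 ++ [dp] :=
        PySem.Set.add_of_not_mem hdpnd
      rw [hinner, if_pos hc, hadd]
      obtain ⟨ih1, ih2, ih3⟩ := ih hndt (stack0 ++ [dp]) (destroyed0 ++ [dp])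
        (remaining.modify dp 0 (fun v => v - 1))
      have hfc : t.filter (fun x => ((remaining.modify dp 0 (fun v => v - 1)).getD x 0 - 1 == 0)
            && !(supd.getD x []).isEmpty && !(destroyed0 ++ [dp]).contains x) =
          t.filter (fun x => (remaining.getD x 0 - 1 == 0)
            && !(supd.getD x []).isEmpty && !destroyed0.contains x) := by
        apply List.filter_congr
        intro x hx
        have hxdp : x ≠ dp := fun h => hdpt (h ▸ hx)
        rw [hrem_ne x hxdp]
        have : ((destroyed0 ++ [dp]).contains x) = destroyed0.contains x := by
          apply Bool.eq_iff_iff.mpr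
          simp only [List.contains_iff_mem, List.mem_append, List.mem_singleton]
          constructor
          · rintro (h | h)
            · exact h
            · exact absurd h hxdp
          · exact Or.inl
        rw [this]
      rw [hfc] at ih1 ih2
      refine ⟨?_, ?_, ?_⟩
      · rw [ih1, List.filter_cons, if_pos hc]
        simp [List.append_assoc]
      · rw [ih2, List.filter_cons, if_pos hc]
        simp [List.append_assoc]
      · intro k
        rw [ih3 k]
        by_cases hk : k = dp
        · subst hk
          rw [hrem_dp]
          simp [hdpt]
        · rw [hrem_ne k hk]
          have : (k ∈ dp :: t) ↔ (k ∈ t) := by simp [hk]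
          simp only [this]
    · rw [hinner, if_neg hc]
      obtain ⟨ih1, ih2, ih3⟩ := ih hndt stack0 destroyed0
        (remaining.modify dp 0 (fun v => v - 1))
      have hfc : t.filter (fun x => ((remaining.modify dp 0 (fun v => v - 1)).getD x 0 - 1 == 0)
            && !(supd.getD x []).isEmpty && !destroyed0.contains x) =
          t.filter (fun x => (remaining.getD x 0 - 1 == 0)
            && !(supd.getD x []).isEmpty && !destroyed0.contains x) := by
        apply List.filter_congr
        intro x hx
        have hxdp : x ≠ dp := fun h => hdpt (h ▸ hx)
        rw [hrem_ne x hxdp]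
      rw [hfc] at ih1 ih2
      refine ⟨?_, ?_, ?_⟩
      · rw [ih1, List.filter_cons, if_neg hc]
      · rw [ih2, List.filter_cons, if_neg hc]
      · intro k
        rw [ih3 k]
        by_cases hk : k = dp
        · subst hk
          rw [hrem_dp]
          simp [hdpt]
        · rw [hrem_ne k hk]
          have : (k ∈ dp :: t) ↔ (k ∈ t) := by simp [hk]
          simp only [this]

lemma pvBLoop_spec (sitems : List (Int × List Int))
    (supd dep : PySem.Dict Int (List Int))
    (hknd : (sitems.map Prod.fst).Nodup)
    (hsnd : ∀ p ∈ sitems, p.2.Nodup)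
    (hsupd : ∀ p ∈ sitems, supd.getD p.1 [] = p.2)
    (hdep : ∀ c, dep.getD c [] = (sitems.filter (fun p => p.2.contains c)).map Prod.fst)
    (P : Int → Prop) (hP : pvClosedOn sitems P) :
    ∀ (fuel : Nat) (stack : List Int) (destroyed : PySem.Set Int)
      (remaining : PySem.Dict Int Int),
      destroyed.Nodup → stack.Nodup → (∀ x ∈ stack, x ∈ destroyed) →
      (∀ x ∈ destroyed, x ∈ sitems.map Prod.fst) →
      (∀ p ∈ sitems, remaining.getD p.1 0 =
        ((p.2.filter (fun s =>
          !(List.contains destroyed s && !List.contains stack s))).length : Int)) →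
      (∀ p ∈ sitems, p.2 ≠ [] → (∀ s ∈ p.2, s ∈ destroyed ∧ s ∉ stack) → p.1 ∈ destroyed) →
      (∀ x ∈ destroyed, P x) →
      stack.length + (sitems.map Prod.fst).length + 1 ≤ fuel + destroyed.length →
      (∀ x ∈ destroyed, x ∈ pvBLoop supd dep fuel stack destroyed remaining) ∧
        (pvBLoop supd dep fuel stack destroyed remaining).Nodup ∧
        pvClosedOn sitems (· ∈ pvBLoop supd dep fuel stack destroyed remaining) ∧
        (∀ x ∈ pvBLoop supd dep fuel stack destroyed remaining, P x) := by
  intro fuel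
  induction fuel with
  | zero =>
    intro stack destroyed remaining hd hs hsd hdk hrem hI4 hPd hlen
    exfalso
    have := (List.Nodup.subperm hd hdk).length_le
    simp only [List.length_map] at this hlen
    omega
  | succ fuel ih =>
    intro stack destroyed remaining hd hs hsd hdk hrem hI4 hPd hlen
    rcases List.eq_nil_or_concat stack with hse | ⟨rest, cur, hstk⟩
    · subst hse
      have hred : pvBLoop supd dep (fuel+1) [] destroyed remaining = destroyed := by
        rw [pvBLoop]
        simp
      rw [hred]
      refine ⟨fun x hx => hx, hd, ?_, hPd⟩
      intro p hp hne hsup2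
      exact hI4 p hp hne (fun s hs' => ⟨hsup2 s hs', by simp⟩)
    · rw [List.concat_eq_append] at hstk
      subst hstk
      rw [List.nodup_append] at hs
      obtain ⟨hrest_nd, _, hdisj_rc⟩ := hs
      have hcur_rest : cur ∉ rest := fun h => hdisj_rc cur h cur (by simp) rfl
      have hcur_d : cur ∈ destroyed := hsd cur (by simp)
      have hred : pvBLoop supd dep (fuel+1) (rest ++ [cur]) destroyed remaining =
          pvBLoop supd dep fuel
            ((dep.getD cur []).foldl (pvBInner supd) (rest, destroyed, remaining)).1
            ((dep.getD cur []).foldl (pvBInner supd) (rest, destroyed, remaining)).2.1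
            ((dep.getD cur []).foldl (pvBInner supd) (rest, destroyed, remaining)).2.2 := by
        rw [pvBLoop]
        rw [if_neg (by simp)]
        simp
      have hdeps_nd : (dep.getD cur []).Nodup := by
        rw [hdep cur]
        exact (List.Sublist.map Prod.fst List.filter_sublist).nodup hknd
      have hmem_deps : ∀ k, k ∈ dep.getD cur [] ↔ ∃ p ∈ sitems, p.1 = k ∧ cur ∈ p.2 := by
        intro k
        rw [hdep cur]
        simp only [List.mem_map, List.mem_filter, List.contains_iff_mem]
        constructor
        · rintro ⟨p, ⟨hp, hcp⟩, rfl⟩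
          exact ⟨p, hp, rfl, hcp⟩
        · rintro ⟨p, hp, rfl, hcp⟩
          exact ⟨p, ⟨hp, hcp⟩, rfl⟩
      have hdeps_iff : ∀ p ∈ sitems, (p.1 ∈ dep.getD cur [] ↔ cur ∈ p.2) := by
        intro p hp
        rw [hmem_deps p.1]
        constructor
        · rintro ⟨q, hq, hq1, hqc⟩
          rwa [List.inj_on_of_nodup_map hknd hp hq hq1.symm]
        · intro hcp
          exact ⟨p, hp, rfl, hcp⟩
      obtain ⟨hf1, hf2, hf3⟩ :=
        pvBFold_spec supd (dep.getD cur []) hdeps_nd rest destroyed remaining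
      set new := (dep.getD cur []).filter (fun x => (remaining.getD x 0 - 1 == 0)
          && !(supd.getD x []).isEmpty && !List.contains destroyed x) with hnewdef
      have hnew_deps : ∀ x ∈ new, x ∈ dep.getD cur [] := fun x hx => (List.mem_filter.mp hx).1
      have hnew_cond : ∀ x ∈ new, ((remaining.getD x 0 - 1 == 0)
          && !(supd.getD x []).isEmpty && !List.contains destroyed x) = true :=
        fun x hx => (List.mem_filter.mp hx).2
      have hcond_sem : ∀ x, ((remaining.getD x 0 - 1 == 0)
          && !(supd.getD x []).isEmpty && !List.contains destroyed x) = true ↔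
          (remaining.getD x 0 = 1 ∧ supd.getD x [] ≠ [] ∧ x ∉ destroyed) := by
        intro x
        simp only [Bool.and_eq_true, Bool.not_eq_true', beq_iff_eq]
        constructor
        · rintro ⟨⟨h1, h2⟩, h3⟩
          refine ⟨by omega, ?_, ?_⟩
          · intro hnil
            rw [hnil] at h2
            simp at h2
          · intro hmem
            rw [List.contains_iff_mem.mpr hmem] at h3
            simp at h3
        · rintro ⟨h1, h2, h3⟩
          refine ⟨⟨by omega, ?_⟩, ?_⟩
          · cases hq : supd.getD x [] with
            | nil => exact absurd hq h2
            | cons a t => rfl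
          · by_cases hb : List.contains destroyed x = true
            · exact absurd (List.contains_iff_mem.mp hb) h3
            · simpa using hb
      have hnew_nd : new.Nodup := hdeps_nd.filter _
      have hnew_notd : ∀ x ∈ new, x ∉ destroyed := fun x hx =>
        ((hcond_sem x).mp (hnew_cond x hx)).2.2
      have hnew_keys : ∀ x ∈ new, x ∈ sitems.map Prod.fst := by
        intro x hx
        obtain ⟨p, hp, rfl, _⟩ := (hmem_deps x).mp (hnew_deps x hx)
        exact List.mem_map_of_mem hp
      have hcur_new : cur ∉ new := fun h => hnew_notd cur h hcur_d
      have hproc : ∀ s, (s ∈ destroyed ++ new ∧ s ∉ rest ++ new) ↔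
          ((s ∈ destroyed ∧ s ∉ rest ++ [cur]) ∨ s = cur) := by
        intro s
        by_cases hsc : s = cur
        · subst hsc
          constructor
          · intro _
            exact Or.inr rfl
          · intro _
            refine ⟨List.mem_append.mpr (Or.inl hcur_d), ?_⟩
            intro h
            rcases List.mem_append.mp h with h | h
            · exact hcur_rest h
            · exact hcur_new h
        · by_cases hsn : s ∈ new
          · have hsd2 : s ∉ destroyed := hnew_notd s hsn
            constructor
            · rintro ⟨_, hns⟩
              exact absurd (List.mem_append.mpr (Or.inr hsn)) hns
            · rintro (⟨hsd3, _⟩ | hc)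
              · exact absurd hsd3 hsd2
              · exact absurd hc hsc
          · constructor
            · rintro ⟨hd1, hn1⟩
              rcases List.mem_append.mp hd1 with hd1 | hd1
              · refine Or.inl ⟨hd1, ?_⟩
                intro h
                rcases List.mem_append.mp h with h | h
                · exact hn1 (List.mem_append.mpr (Or.inl h))
                · exact hsc (by simpa using h)
              · exact absurd hd1 hsn
            · rintro (⟨hd1, hn1⟩ | hc)
              · refine ⟨List.mem_append.mpr (Or.inl hd1), ?_⟩
                intro h
                rcases List.mem_append.mp h with h | h
                · exact hn1 (List.mem_append.mpr (Or.inl h))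
                · exact hsn h
              · exact absurd hc hsc
      have hub : ∀ (dl st : List Int) (s : Int),
          ((!(List.contains dl s && !List.contains st s)) = true) ↔ ¬(s ∈ dl ∧ s ∉ st) := by
        intro dl st s
        by_cases h1 : s ∈ dl <;> by_cases h2 : s ∈ st <;>
          simp [h1, h2]
      have huold_cur : (!(List.contains destroyed cur
          && !List.contains (rest ++ [cur]) cur)) = true :=
        (hub destroyed (rest ++ [cur]) cur).mpr (fun h => h.2 (by simp))
      have hunew_eq : ∀ s, (!(List.contains (destroyed ++ new) s
            && !List.contains (rest ++ new) s)) =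
          ((!(List.contains destroyed s && !List.contains (rest ++ [cur]) s))
            && !(s == cur)) := by
        intro s
        apply Bool.eq_iff_iff.mpr
        rw [hub, Bool.and_eq_true, hub]
        constructor
        · intro h
          refine ⟨fun hp => h ((hproc s).mpr (Or.inl hp)), ?_⟩
          have hsc : s ≠ cur := fun he => h ((hproc s).mpr (Or.inr he))
          simp [hsc]
        · rintro ⟨h1, h2⟩ hp'
          rcases (hproc s).mp hp' with hp | hc
          · exact h1 hp
          · rw [hc] at h2
            simp at h2
      have hrem' : ∀ p ∈ sitems,
          ((dep.getD cur []).foldl (pvBInner supd) (rest, destroyed, remaining)).2.2.getD p.1 0 =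
          ((p.2.filter (fun s => !(List.contains (destroyed ++ new) s
              && !List.contains (rest ++ new) s))).length : Int) := by
        intro p hp
        rw [hf3 p.1]
        have hstep := pv_filter_length_step p.2 (hsnd p hp)
          (fun s => !(List.contains destroyed s && !List.contains (rest ++ [cur]) s))
          (fun s => !(List.contains (destroyed ++ new) s && !List.contains (rest ++ new) s))
          cur huold_cur hunew_eq
        rw [hstep, ← hrem p hp]
        by_cases hcp : cur ∈ p.2
        · rw [if_pos hcp, if_pos ((hdeps_iff p hp).mpr hcp)]
        · rw [if_neg hcp, if_neg (fun h => hcp ((hdeps_iff p hp).mp h))]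
      have hI4' : ∀ p ∈ sitems, p.2 ≠ [] →
          (∀ s ∈ p.2, s ∈ destroyed ++ new ∧ s ∉ rest ++ new) → p.1 ∈ destroyed ++ new := by
        intro p hp hne hsup2
        have hsup3 : ∀ s ∈ p.2, (s ∈ destroyed ∧ s ∉ rest ++ [cur]) ∨ s = cur :=
          fun s hs => (hproc s).mp (hsup2 s hs)
        by_cases hcp : cur ∈ p.2
        · by_cases hp1 : p.1 ∈ destroyed
          · exact List.mem_append.mpr (Or.inl hp1)
          · have hfuold : p.2.filter (fun s => !(List.contains destroyed s
                && !List.contains (rest ++ [cur]) s)) = [cur] := by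
              have hcongr : ∀ s ∈ p.2, (!(List.contains destroyed s
                  && !List.contains (rest ++ [cur]) s)) = (s == cur) := by
                intro s hs
                apply Bool.eq_iff_iff.mpr
                rw [hub]
                constructor
                · intro h
                  rcases hsup3 s hs with hps | hc
                  · exact absurd hps h
                  · simp [hc]
                · intro h
                  have hsc : s = cur := by simpa using h
                  subst hsc
                  exact (hub _ _ _).mp huold_cur
              rw [List.filter_congr hcongr, pv_filter_beq_of_nodup p.2 (hsnd p hp) cur,
                if_pos hcp]
            have hr1 : remaining.getD p.1 0 = 1 := by
              rw [hrem p hp, hfuold]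
              rfl
            refine List.mem_append.mpr (Or.inr (List.mem_filter.mpr
              ⟨(hdeps_iff p hp).mpr hcp, ?_⟩))
            exact (hcond_sem p.1).mpr ⟨hr1, by rw [hsupd p hp]; exact hne, hp1⟩
        · have hall : ∀ s ∈ p.2, s ∈ destroyed ∧ s ∉ rest ++ [cur] := by
            intro s hs
            rcases hsup3 s hs with h | h
            · exact h
            · exact absurd (h ▸ hs) hcp
          exact List.mem_append.mpr (Or.inl (hI4 p hp hne hall))
      have hPd' : ∀ x ∈ destroyed ++ new, P x := by
        intro x hx
        rcases List.mem_append.mp hx with hx | hx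
        · exact hPd x hx
        · have hxdep := hnew_deps x hx
          have hxcond := (hcond_sem x).mp (hnew_cond x hx)
          obtain ⟨p, hp, rfl, hcp⟩ := (hmem_deps x).mp hxdep
          obtain ⟨hr1, hne1, hnd1⟩ := hxcond
          have hne2 : p.2 ≠ [] := by rwa [hsupd p hp] at hne1
          have hlenf : (p.2.filter (fun s => !(List.contains destroyed s
              && !List.contains (rest ++ [cur]) s))).length = 1 := by
            have h0 := hrem p hp
            rw [hr1] at h0
            exact_mod_cast h0.symm
          have hsingle := pv_filter_singleton_of_length_one p.2 _ cur hcp huold_cur hlenf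
          have hallP : ∀ s ∈ p.2, P s := by
            intro s hs
            by_cases hu : (!(List.contains destroyed s
                && !List.contains (rest ++ [cur]) s)) = true
            · have hsc : s = cur := hsingle s hs hu
              exact hsc ▸ hPd cur hcur_d
            · have hpr : s ∈ destroyed ∧ s ∉ rest ++ [cur] := by
                by_contra hcon
                exact hu ((hub _ _ _).mpr hcon)
              exact hPd s hpr.1
          exact hP p hp hne2 hallP
      have hlen' : (rest ++ new).length + (sitems.map Prod.fst).length + 1 ≤
          fuel + (destroyed ++ new).length := by
        simp only [List.length_append, List.length_singleton] at hlen ⊢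
        omega
      have hd' : (destroyed ++ new).Nodup :=
        List.Nodup.append hd hnew_nd (fun a ha han => hnew_notd a han ha)
      have hs' : (rest ++ new).Nodup :=
        List.Nodup.append hrest_nd hnew_nd
          (fun a ha han => hnew_notd a han (hsd a (List.mem_append.mpr (Or.inl ha))))
      have hsd' : ∀ x ∈ rest ++ new, x ∈ destroyed ++ new := by
        intro x hx
        rcases List.mem_append.mp hx with hx | hx
        · exact List.mem_append.mpr (Or.inl (hsd x (List.mem_append.mpr (Or.inl hx))))
        · exact List.mem_append.mpr (Or.inr hx)
      have hdk' : ∀ x ∈ destroyed ++ new, x ∈ sitems.map Prod.fst := by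
        intro x hx
        rcases List.mem_append.mp hx with hx | hx
        · exact hdk x hx
        · exact hnew_keys x hx
      rw [hred, hf1, hf2]
      obtain ⟨c1, c2, c3, c4⟩ := ih (rest ++ new) (destroyed ++ new)
        ((dep.getD cur []).foldl (pvBInner supd) (rest, destroyed, remaining)).2.2
        hd' hs' hsd' hdk' hrem' hI4' hPd' hlen'
      refine ⟨?_, c2, c3, c4⟩
      intro x hx
      exact c1 x (List.mem_append.mpr (Or.inl hx))

-- characterizations of the three dictionaries B precomputes, for d = ofList restmap
lemma pvB_supd_items (restmap : List (Int × List Int)) :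
    ((PySem.Dict.ofList restmap).items.foldl
        (fun m p => m.insert p.1 (PySem.List.dedup p.2)) PySem.Dict.empty).items =
      (PySem.Dict.ofList restmap).items.map (fun p => (p.1, PySem.List.dedup p.2)) := by
  have hnd : ((PySem.Dict.ofList restmap).items.map Prod.fst).Nodup := by
    have := PySem.Dict.nodup_keys_ofList restmap
    simpa [PySem.Dict.keys] using this
  have h := PySem.Dict.items_foldl_insert_fresh (PySem.Dict.ofList restmap).items Prod.fst
    (fun p => PySem.List.dedup p.2) PySem.Dict.empty
    (fun a _ => PySem.Dict.contains_empty a.1) hnd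
  simpa using h

lemma pvB_dep_getD (sitems : List (Int × List Int)) (hsnd : ∀ p ∈ sitems, p.2.Nodup) (c : Int) :
    (sitems.foldl (fun dd p =>
        p.2.foldl (fun dd s => dd.modify s [] (fun l => l ++ [p.1])) dd)
        (PySem.Dict.empty : PySem.Dict Int (List Int))).getD c [] =
      (sitems.filter (fun p => p.2.contains c)).map Prod.fst := by
  have hflat : (sitems.flatMap (fun p => p.2.map (fun s => (s, p.1)))).foldl
        (fun dd q => dd.modify q.1 [] (fun l => l ++ [q.2]))
        (PySem.Dict.empty : PySem.Dict Int (List Int)) =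
      sitems.foldl (fun dd p =>
        p.2.foldl (fun dd s => dd.modify s [] (fun l => l ++ [p.1])) dd) PySem.Dict.empty := by
    rw [List.flatMap_def, List.foldl_flatten, List.foldl_map]
    congr 1
    funext dd p
    rw [List.foldl_map]
  rw [← hflat, PySem.Dict.getD_foldl_modify_append]
  have hempty : (PySem.Dict.empty : PySem.Dict Int (List Int)).getD c [] = [] := rfl
  rw [hempty, List.nil_append]
  have aux : ∀ (l : List (Int × List Int)), (∀ p ∈ l, p.2.Nodup) →
      ((l.flatMap (fun p => p.2.map (fun s => (s, p.1)))).filter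
        (fun q => q.1 == c)).map (·.2) =
      (l.filter (fun p => p.2.contains c)).map Prod.fst := by
    intro l
    induction l with
    | nil => intro _; simp
    | cons p t ihl =>
      intro hnd
      have hpnd : p.2.Nodup := hnd p (by simp)
      have iht := ihl (fun q hq => hnd q (by simp [hq]))
      rw [List.flatMap_cons, List.filter_append, List.map_append, iht]
      have hhead : ((p.2.map (fun s => (s, p.1))).filter (fun q => q.1 == c)).map (·.2) =
          if c ∈ p.2 then [p.1] else [] := by
        rw [List.filter_map, List.map_map]
        have : (p.2.filter ((fun (q : Int × Int) => q.1 == c) ∘ (fun s => (s, p.1)))) =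
            p.2.filter (fun s => s == c) := rfl
        rw [this, pv_filter_beq_of_nodup p.2 hpnd c]
        by_cases hcp : c ∈ p.2
        · simp [hcp]
        · simp [hcp]
      rw [hhead, List.filter_cons]
      by_cases hcp : c ∈ p.2
      · rw [if_pos hcp, if_pos (by simpa [List.contains_iff_mem] using hcp)]
        simp
      · rw [if_neg hcp, if_neg (by simpa [List.contains_iff_mem] using hcp)]
        simp
  exact aux sitems hsnd

lemma pvB_base_getD (sitems : List (Int × List Int)) (hknd : (sitems.map Prod.fst).Nodup) :
    ∀ p ∈ sitems,
      (sitems.foldl (fun m p => m.insert p.1 ((p.2.length : Int))) PySem.Dict.empty).getD p.1 0 =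
        (p.2.length : Int) := by
  have hitems : (sitems.foldl (fun m p => m.insert p.1 ((p.2.length : Int)))
        PySem.Dict.empty).items = sitems.map (fun p => (p.1, (p.2.length : Int))) := by
    have h := PySem.Dict.items_foldl_insert_fresh sitems Prod.fst
      (fun p => ((p.2.length : Int))) PySem.Dict.empty
      (fun a _ => PySem.Dict.contains_empty a.1) hknd
    simpa using h
  intro p hp
  apply PySem.Dict.getD_of_mem_items
  · rw [hitems]
    exact List.mem_map_of_mem hp
  · show (List.map Prod.fst _).Nodup
    rw [hitems, List.map_map]
    exact hknd

lemma pvGood_map_dedup (items : List (Int × List Int)) (start : Int) (R : List Int)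
    (h : pvGood (items.map (fun p => (p.1, PySem.List.dedup p.2))) start R) :
    pvGood items start R := by
  have hdnil : ∀ l : List Int, PySem.List.dedup l = [] → l = [] := by
    intro l hl
    rw [List.eq_nil_iff_forall_not_mem]
    intro x hx
    have hm : x ∈ PySem.List.dedup l := (PySem.List.mem_dedup l x).mpr hx
    rw [hl] at hm
    simp at hm
  have hcl : ∀ P : Int → Prop,
      pvClosedOn (items.map (fun p => (p.1, PySem.List.dedup p.2))) P ↔ pvClosedOn items P := by
    intro P
    constructor
    · intro h p hp hne hsup
      exact h (p.1, PySem.List.dedup p.2) (List.mem_map_of_mem hp)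
        (fun hd => hne (hdnil p.2 hd))
        (fun s hs => hsup s ((PySem.List.mem_dedup p.2 s).mp hs))
    · intro h q hq hne hsup
      obtain ⟨p, hp, rfl⟩ := List.mem_map.mp hq
      exact h p hp (fun hnl => hne (by rw [hnl]; rfl))
        (fun s hs => hsup s ((PySem.List.mem_dedup p.2 s).mpr hs))
  obtain ⟨hs, hc, hn, hm⟩ := h
  exact ⟨hs, (hcl _).mp hc, hn, fun P hPs hPc => hm P hPs ((hcl _).mpr hPc)⟩

lemma pvB_good (restmap : List (Int × List Int)) (start : Int)
    (hs : start ∈ (PySem.Dict.ofList restmap).keys) :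
    pvGood (PySem.Dict.ofList restmap).items start
      (pvBLoop
        ((PySem.Dict.ofList restmap).items.foldl
          (fun m p => m.insert p.1 (PySem.List.dedup p.2)) PySem.Dict.empty)
        (((PySem.Dict.ofList restmap).items.foldl
            (fun m p => m.insert p.1 (PySem.List.dedup p.2)) PySem.Dict.empty).items.foldl
          (fun dd p => p.2.foldl (fun dd s => dd.modify s [] (fun l => l ++ [p.1])) dd)
          PySem.Dict.empty)
        (restmap.length + 1) [start] (PySem.Set.ofList [start])
        (((PySem.Dict.ofList restmap).items.foldl
            (fun m p => m.insert p.1 (PySem.List.dedup p.2)) PySem.Dict.empty).items.foldl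
          (fun m p => m.insert p.1 ((p.2.length : Int))) PySem.Dict.empty)) := by
  set d := PySem.Dict.ofList restmap with hdd
  set sitems := d.items.map (fun p => (p.1, PySem.List.dedup p.2)) with hsitems
  have hsupd_items : (d.items.foldl
      (fun m p => m.insert p.1 (PySem.List.dedup p.2)) PySem.Dict.empty).items = sitems :=
    pvB_supd_items restmap
  set supd := d.items.foldl (fun m p => m.insert p.1 (PySem.List.dedup p.2))
    PySem.Dict.empty with hsupdd
  have hkeys0 : (d.items.map Prod.fst).Nodup := by
    have := PySem.Dict.nodup_keys_ofList restmap
    simpa [PySem.Dict.keys] using this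
  have hknd : (sitems.map Prod.fst).Nodup := by
    rw [hsitems, List.map_map]
    exact hkeys0
  have hsnd : ∀ p ∈ sitems, p.2.Nodup := by
    intro p hp
    rw [hsitems] at hp
    obtain ⟨q, _, rfl⟩ := List.mem_map.mp hp
    exact PySem.List.nodup_dedup q.2
  have hsupd_keys_nd : supd.keys.Nodup := by
    show (supd.items.map (·.1)).Nodup
    rw [hsupd_items]
    exact hknd
  have hsupdc : ∀ p ∈ sitems, supd.getD p.1 [] = p.2 := by
    intro p hp
    exact PySem.Dict.getD_of_mem_items supd (by rw [hsupd_items]; exact hp) hsupd_keys_nd []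
  have hdepc : ∀ c, (supd.items.foldl (fun dd p =>
      p.2.foldl (fun dd s => dd.modify s [] (fun l => l ++ [p.1])) dd)
      PySem.Dict.empty).getD c [] =
      (sitems.filter (fun p => p.2.contains c)).map Prod.fst := by
    intro c
    rw [hsupd_items]
    exact pvB_dep_getD sitems hsnd c
  have hbasec : ∀ p ∈ sitems, (supd.items.foldl
      (fun m p => m.insert p.1 ((p.2.length : Int))) PySem.Dict.empty).getD p.1 0 =
      (p.2.length : Int) := by
    intro p hp
    rw [hsupd_items]
    exact pvB_base_getD sitems hknd p hp
  have hstart : start ∈ sitems.map Prod.fst := by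
    rw [hsitems, List.map_map]
    exact hs
  have hsz : sitems.length ≤ restmap.length := by
    rw [hsitems]
    rw [List.length_map]
    exact pv_size_ofList_le restmap
  have hof : PySem.Set.ofList [start] = [start] := rfl
  have base : ∀ (P : Int → Prop), pvClosedOn sitems P → P start →
      (∀ x ∈ [start], x ∈ pvBLoop supd
          (supd.items.foldl (fun dd p =>
            p.2.foldl (fun dd s => dd.modify s [] (fun l => l ++ [p.1])) dd)
            PySem.Dict.empty)
          (restmap.length + 1) [start] [start]
          (supd.items.foldl (fun m p => m.insert p.1 ((p.2.length : Int)))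
            PySem.Dict.empty)) ∧
        (pvBLoop supd
          (supd.items.foldl (fun dd p =>
            p.2.foldl (fun dd s => dd.modify s [] (fun l => l ++ [p.1])) dd)
            PySem.Dict.empty)
          (restmap.length + 1) [start] [start]
          (supd.items.foldl (fun m p => m.insert p.1 ((p.2.length : Int)))
            PySem.Dict.empty)).Nodup ∧
        pvClosedOn sitems (· ∈ pvBLoop supd
          (supd.items.foldl (fun dd p =>
            p.2.foldl (fun dd s => dd.modify s [] (fun l => l ++ [p.1])) dd)
            PySem.Dict.empty)
          (restmap.length + 1) [start] [start]
          (supd.items.foldl (fun m p => m.insert p.1 ((p.2.length : Int)))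
            PySem.Dict.empty)) ∧
        (∀ x ∈ pvBLoop supd
          (supd.items.foldl (fun dd p =>
            p.2.foldl (fun dd s => dd.modify s [] (fun l => l ++ [p.1])) dd)
            PySem.Dict.empty)
          (restmap.length + 1) [start] [start]
          (supd.items.foldl (fun m p => m.insert p.1 ((p.2.length : Int)))
            PySem.Dict.empty), P x) := by
    intro P hPc hPs
    exact pvBLoop_spec sitems supd _ hknd hsnd hsupdc hdepc P hPc
      (restmap.length + 1) [start] [start] _
      (by simp) (by simp) (fun x hx => hx)
      (by
        intro x hx
        simp only [List.mem_singleton] at hx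
        subst hx
        exact hstart)
      (by
        intro p hp
        have hfe : p.2.filter (fun s =>
            !(List.contains [start] s && !List.contains [start] s)) = p.2 := by
          apply List.filter_eq_self.mpr
          intro a _
          cases h : List.contains [start] a <;> simp
        rw [hfe]
        exact hbasec p hp)
      (by
        intro p hp hne hsup2
        obtain ⟨s0, hs0⟩ := List.exists_mem_of_ne_nil p.2 hne
        exact absurd (hsup2 s0 hs0).1 (fun hm => (hsup2 s0 hs0).2 hm))
      (by
        intro x hx
        simp only [List.mem_singleton] at hx
        subst hx
        exact hPs)
      (by
        simp only [List.length_singleton, List.length_map]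
        omega)
  have triv := base (fun _ => True) (by intro _ _ _ _; trivial) trivial
  rw [hof]
  apply pvGood_map_dedup
  rw [← hsitems]
  refine ⟨triv.1 start (by simp), triv.2.2.1, triv.2.1, ?_⟩
  intro P hPs hPc
  exact (base P hPc hPs).2.2.2

lemma pv_foldl_congr {l : List Int} {f g : Int → Int → Int}
    (h : ∀ x ∈ l, ∀ r, f r x = g r x) : ∀ r, l.foldl f r = l.foldl g r := by
  induction l with
  | nil => intro r; rfl
  | cons a t ih =>
    intro r
    simp only [List.foldl_cons]
    rw [h a (by simp) r]
    exact ih (fun x hx r => h x (by simp [hx]) r) _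

-- ===== VERDICT (by name: the statement is the Claim_ definition above) =====
theorem count_chain_reaction_cubes_spec : Claim_equal_count_chain_reaction_cubes := by
  intro restmap _
  unfold Spec_count_chain_reaction_cubes
  unfold count_chain_reaction_cubes count_chain_reaction_cubes_alt
  have hkeyseq : ((PySem.Dict.ofList restmap).items.foldl
      (fun m p => m.insert p.1 (PySem.List.dedup p.2)) PySem.Dict.empty).keys =
      (PySem.Dict.ofList restmap).keys := by
    unfold PySem.Dict.keys
    rw [pvB_supd_items restmap, List.map_map]
    rfl
  dsimp only []
  rw [hkeyseq]
  have hcongr : ∀ cube ∈ (PySem.Dict.ofList restmap).keys, ∀ r : Int,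
      r + (((PySem.Set.len (pvALoop (PySem.Dict.ofList restmap).items
        ((PySem.Dict.ofList restmap).items.length + 1) PySem.Set.empty
        (PySem.Set.ofList [cube]))) : Int) - 1) =
      r + (((PySem.Set.len (pvBLoop
        ((PySem.Dict.ofList restmap).items.foldl
          (fun m p => m.insert p.1 (PySem.List.dedup p.2)) PySem.Dict.empty)
        (((PySem.Dict.ofList restmap).items.foldl
            (fun m p => m.insert p.1 (PySem.List.dedup p.2)) PySem.Dict.empty).items.foldl
          (fun dd p => p.2.foldl (fun dd s => dd.modify s [] (fun l => l ++ [p.1])) dd)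
          PySem.Dict.empty)
        (restmap.length + 1) [cube] (PySem.Set.ofList [cube])
        (((PySem.Dict.ofList restmap).items.foldl
            (fun m p => m.insert p.1 (PySem.List.dedup p.2)) PySem.Dict.empty).items.foldl
          (fun m p => m.insert p.1 ((p.2.length : Int))) PySem.Dict.empty))) : Int) - 1) := by
    intro cube hcube r
    have hA : pvGood (PySem.Dict.ofList restmap).items cube
        (pvALoop (PySem.Dict.ofList restmap).items
          ((PySem.Dict.ofList restmap).items.length + 1) [] [cube]) := by
      apply pvA_good
      · have := PySem.Dict.nodup_keys_ofList restmap
        simpa [PySem.Dict.keys] using this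
      · exact hcube
    have hB := pvB_good restmap cube hcube
    have hlen := pvGood_length_eq hA hB
    have he1 : pvALoop (PySem.Dict.ofList restmap).items
        ((PySem.Dict.ofList restmap).items.length + 1) PySem.Set.empty
        (PySem.Set.ofList [cube]) =
        pvALoop (PySem.Dict.ofList restmap).items
          ((PySem.Dict.ofList restmap).items.length + 1) [] [cube] := rfl
    rw [he1]
    have hlenlen : (PySem.Set.len (pvALoop (PySem.Dict.ofList restmap).items
        ((PySem.Dict.ofList restmap).items.length + 1) [] [cube])) =
        (PySem.Set.len (pvBLoop
        ((PySem.Dict.ofList restmap).items.foldl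
          (fun m p => m.insert p.1 (PySem.List.dedup p.2)) PySem.Dict.empty)
        (((PySem.Dict.ofList restmap).items.foldl
            (fun m p => m.insert p.1 (PySem.List.dedup p.2)) PySem.Dict.empty).items.foldl
          (fun dd p => p.2.foldl (fun dd s => dd.modify s [] (fun l => l ++ [p.1])) dd)
          PySem.Dict.empty)
        (restmap.length + 1) [cube] (PySem.Set.ofList [cube])
        (((PySem.Dict.ofList restmap).items.foldl
            (fun m p => m.insert p.1 (PySem.List.dedup p.2)) PySem.Dict.empty).items.foldl
          (fun m p => m.insert p.1 ((p.2.length : Int))) PySem.Dict.empty))) := by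
      unfold PySem.Set.len
      exact_mod_cast hlen
    rw [hlenlen]
  exact pv_foldl_congr hcongr 0
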